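-- pv_equiv track=rewrite | github.com/jamesgleave/DeepDockingGUI | Docking/GUI/process_gui_data.py | find_max_iteration
-- ===== SOURCE A (Python) =====
-- def find_max_iteration(iterations):
--     """Returns the current iteration"""
--     max_itr = iterations[0]
--     for itr in iterations:
--         if int(max_itr.split("_")[-1]) > int(itr.split("_")[-1]):
--             pass
--         else:
--             max_itr = itr
--     return max_itr
-- ===== SOURCE B (Python) =====
-- def find_max_iteration(iterations):
--     """Returns the current iteration"""
--     return sorted(iterations, key=lambda s: int(s.split("_")[-1]))[-1]
-- ===== Notes on version B (the rewrite author's own statement) =====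
-- stated objective: simpler
-- what changed: Replaces the explicit running-max loop (update on <=, keeping the last occurrence) by a stable sort on the numeric suffix key followed by taking the last element; stability makes [-1] the last element with maximal key, matching A's tie behaviour, and both raise on the empty list or unparsable suffixes.
import Mathlib
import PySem

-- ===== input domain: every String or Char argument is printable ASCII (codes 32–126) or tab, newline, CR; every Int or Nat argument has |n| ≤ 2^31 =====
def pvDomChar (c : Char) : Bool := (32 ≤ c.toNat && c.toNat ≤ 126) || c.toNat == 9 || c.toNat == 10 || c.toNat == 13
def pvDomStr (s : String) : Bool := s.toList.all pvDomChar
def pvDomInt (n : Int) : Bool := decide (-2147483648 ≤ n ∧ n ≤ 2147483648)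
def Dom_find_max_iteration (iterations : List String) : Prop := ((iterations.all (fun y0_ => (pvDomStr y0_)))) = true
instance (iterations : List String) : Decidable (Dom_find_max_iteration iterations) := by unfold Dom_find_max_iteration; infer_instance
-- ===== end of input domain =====

-- B replaces A's running-max loop by a stable sort on the numeric suffix key followed by taking
-- the last element (objective: simpler); both raise on the empty list or on an unparsable suffix.

-- ===== PORT A =====
-- int(s.split("_")[-1]): split? is always some (separator ≠ ""); ofStr? is some under
-- Pre_ (the suffix parses), so the .getD totalizations are exact on Pre_.
def pvKey? (s : String) : Option Int :=
  PySem.Int.ofStr? (PySem.List.pyGetD ((PySem.Str.split? s "_").getD []) (-1) "")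

def pvKey (s : String) : Int := (pvKey? s).getD 0

def pvStep (max_itr itr : String) : String :=
  if pvKey max_itr > pvKey itr then max_itr else itr

def find_max_iteration (iterations : List String) : String :=
  match iterations with
  | [] => ""   -- iterations[0] raises IndexError here; excluded by Pre_
  | h :: _ => iterations.foldl pvStep h

-- ===== PORT B =====
def find_max_iteration_alt (iterations : List String) : String :=
  -- sorted(iterations, key=…)[-1]; [-1] on the empty list raises IndexError, excluded by Pre_
  PySem.List.pyGetD (PySem.List.sorted iterations pvKey false) (-1) ""

-- ===== PRECONDITION & SPEC =====
-- int()-literal shape: after stripping whitespace and an optional sign, digits with single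
-- underscores between digits (what int() accepts on the ASCII domain)
def pvDigitsUnd : List Char → Bool
  | [] => false
  | [c] => c.isDigit
  | c :: '_' :: rest => c.isDigit && pvDigitsUnd rest
  | c :: c' :: rest => c.isDigit && pvDigitsUnd (c' :: rest)

def pvIntLike (s : String) : Bool :=
  match (PySem.Str.strip s).toList with
  | c :: rest => if c = '+' || c = '-' then pvDigitsUnd rest else pvDigitsUnd (c :: rest)
  | [] => false
-- e.g. pvIntLike " 12 " = true, pvIntLike "+5" = true, pvIntLike "-31" = true,
-- pvIntLike "0x1A" = false, pvIntLike "1e3" = false: iteration names such as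
-- "model_phase1_0007" or "phase_2_0042" have an int()-parsable numeric suffix

-- exactly where the Python A returns: a nonempty list whose every numeric suffix parses with int()
def Pre_find_max_iteration (iterations : List String) : Prop :=
  iterations ≠ [] ∧
    ∀ s ∈ iterations,
      pvIntLike (PySem.List.pyGetD ((PySem.Str.split? s "_").getD []) (-1) "") = true
instance (iterations : List String) : Decidable (Pre_find_max_iteration iterations) := by
  unfold Pre_find_max_iteration; infer_instance

def pvWitness_find_max_iteration : List String := ["it_1", "it_3", "it_2"]

def Spec_find_max_iteration (iterations : List String) (out : String) : Prop := out = find_max_iteration_alt iterations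
instance (iterations : List String) (out : String) : Decidable (Spec_find_max_iteration iterations out) := by unfold Spec_find_max_iteration; infer_instance

-- ===== CLAIM (what is proved, stated in full; the proofs are below) =====
def Claim_equal_find_max_iteration : Prop := ∀ (iterations : List String), Dom_find_max_iteration iterations → Pre_find_max_iteration iterations → Spec_find_max_iteration iterations (find_max_iteration iterations)

-- ===== LEMMAS AND PROOFS =====

theorem pv_insertBy_ne_nil (b : String → String → Bool) (x : String) (l : List String) :
    PySem.List.insertBy b x l ≠ [] := by
  cases l with
  | nil => simp [PySem.List.insertBy]
  | cons y ys => simp only [PySem.List.insertBy]; split <;> simp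

theorem pv_getLastD_indep (l : List String) (hl : l ≠ []) (d d' : String) :
    l.getLastD d = l.getLastD d' := by
  cases l with
  | nil => exact absurd rfl hl
  | cons a l =>
    cases e : (a :: l).getLast? with
    | none => exact absurd (List.getLast?_eq_none_iff.mp e) (by simp)
    | some v => rw [List.getLastD_eq_getLast?, List.getLastD_eq_getLast?, e]; rfl

-- last element of a stable insertion into a key-sorted list = A's update step against the old last
theorem getLastD_insertBy (x : String) (ys : List String) (d : String)
    (hp : ys.Pairwise (fun a b => pvKey a ≤ pvKey b)) :
    (PySem.List.insertBy (fun a b => decide (pvKey a < pvKey b)) x ys).getLastD d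
      = pvStep (ys.getLastD x) x := by
  induction ys with
  | nil => simp [PySem.List.insertBy, pvStep]
  | cons y ys ih =>
    rw [List.pairwise_cons] at hp
    by_cases h : pvKey x < pvKey y
    · have hm : (y :: ys).getLastD x ∈ y :: ys := by
        rw [List.getLastD_cons]; exact List.getLastD_mem_cons
      have hlast : pvKey x < pvKey ((y :: ys).getLastD x) := by
        rcases List.mem_cons.mp hm with hm' | hm'
        · rw [hm']; exact h
        · exact lt_of_lt_of_le h (hp.1 _ hm')
      simp only [PySem.List.insertBy, h, decide_true, if_true]
      rw [pvStep, if_pos hlast, List.getLastD_cons, List.getLastD_cons]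
    · simp only [PySem.List.insertBy, h, decide_false, Bool.false_eq_true, if_false]
      cases ys with
      | nil => simp [PySem.List.insertBy, pvStep, h]
      | cons z zs =>
        have ihc := ih hp.2
        rw [List.getLastD_cons,
            pv_getLastD_indep _ (pv_insertBy_ne_nil _ x (z :: zs)) y d, ihc]
        simp

theorem sorted_last_eq_foldl (h : String) (t : List String) :
    (PySem.List.sorted (h :: t) pvKey false).getLastD "" = t.foldl pvStep h := by
  induction t using List.reverseRecOn with
  | nil => rfl
  | append_singleton t x ih =>
    have hs : PySem.List.sorted (h :: (t ++ [x])) pvKey false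
        = PySem.List.insertBy (fun a b => decide (pvKey a < pvKey b)) x
            (PySem.List.sorted (h :: t) pvKey false) := by
      rw [PySem.List.sorted_eq_foldl_insertBy, PySem.List.sorted_eq_foldl_insertBy]
      show List.foldl _ _ ((h :: t) ++ [x]) = _
      rw [List.foldl_append]
      rfl
    have hne : PySem.List.sorted (h :: t) pvKey false ≠ [] := by
      intro hc
      exact List.cons_ne_nil h t ((PySem.List.sorted_eq_nil_iff _ _ _).mp hc)
    rw [hs, getLastD_insertBy x _ "" (PySem.List.sorted_pairwise _ _), List.foldl_append,
        List.foldl_cons, List.foldl_nil, pv_getLastD_indep _ hne x "", ih]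

theorem pyGetD_neg_one_getLastD (xs : List String) :
    PySem.List.pyGetD xs (-1) "" = xs.getLastD "" := by
  simp [PySem.List.pyGetD, PySem.List.pyGet?_neg_one, List.getLastD_eq_getLast?]

-- ===== VERDICT (by name: the statement is the Claim_ definition above) =====
theorem find_max_iteration_spec : Claim_equal_find_max_iteration := by
  intro iterations _ hpre
  unfold Spec_find_max_iteration find_max_iteration find_max_iteration_alt
  cases iterations with
  | nil => exact absurd rfl hpre.1
  | cons h t =>
    rw [pyGetD_neg_one_getLastD, sorted_last_eq_foldl]
    have hstep : pvStep h h = h := by simp [pvStep]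
    simp [List.foldl_cons, hstep]
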